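-- pv_equiv track=rewrite | github.com/jrw34/CapstoneProject | display_perfect_match.py | edge_index_zipper
-- ===== SOURCE A (Python) =====
-- def edge_index_zipper(graph_dict):
--     """Returns zipped list of brand indices mapping to their respective description"""
--     parent_child_idx_map = {i : [] for i in range(0, len(graph_dict))}
--
--     parent_idx, child_idx = 0, 0
--     for k,v in graph_dict.items():
--         for k2, v2 in v.items():
--             parent_child_idx_map[parent_idx].append(child_idx)
--             child_idx += 1
--         parent_idx += 1
--
--     parent_idx_list, child_idx_list = [], []
--     for k,v in parent_child_idx_map.items():
--         parent_idx_list.append([k]*len(v))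
--         child_idx_list.append(v)
--
--     #return flattened lists zipped together
--     return zip([i for j in parent_idx_list for i in j], [k for l in child_idx_list for k in l])
-- ===== SOURCE B (Python) =====
-- def edge_index_zipper(graph_dict):
--     """Returns zipped list of brand indices mapping to their respective description"""
--     # prefix sums of the inner-dict sizes; the parent of flat child index j is
--     # found by binary search for the block of the prefix-sum table containing j
--     lengths = [len(v) for v in graph_dict.values()]
--     prefix = [0]
--     for n in lengths:
--         prefix.append(prefix[-1] + n)
--     total = prefix[-1]
--
--     def parent_of(j):
--         lo, hi = 0, len(lengths)
--         while lo < hi: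
--             mid = (lo + hi) // 2
--             if prefix[mid + 1] <= j:
--                 lo = mid + 1
--             else:
--                 hi = mid
--         return lo
--
--     return zip(map(parent_of, range(total)), range(total))
-- ===== Notes on version B (the rewrite author's own statement) =====
-- stated objective: alternative
-- what changed: B replaces A's parent->children dict accumulation with running counters and double flattening by a prefix-sum table of the inner-dict sizes: each flat child index j is paired with its parent found by binary search over the prefix sums.
import Mathlib
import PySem

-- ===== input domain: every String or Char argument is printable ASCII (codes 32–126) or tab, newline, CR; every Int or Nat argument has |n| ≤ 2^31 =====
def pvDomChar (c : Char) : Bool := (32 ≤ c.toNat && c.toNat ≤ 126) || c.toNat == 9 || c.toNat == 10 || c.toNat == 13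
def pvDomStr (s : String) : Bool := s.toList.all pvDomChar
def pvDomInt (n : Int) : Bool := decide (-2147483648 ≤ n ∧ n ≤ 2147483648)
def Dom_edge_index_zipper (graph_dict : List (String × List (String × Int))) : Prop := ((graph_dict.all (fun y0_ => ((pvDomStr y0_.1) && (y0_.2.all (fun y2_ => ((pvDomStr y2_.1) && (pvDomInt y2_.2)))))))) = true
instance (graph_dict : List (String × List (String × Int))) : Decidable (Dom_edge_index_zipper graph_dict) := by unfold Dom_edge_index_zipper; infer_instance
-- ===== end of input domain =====

-- B replaces A's dict-of-child-lists accumulation and double flattening by a prefix-sum table with a per-child binary search — a different algorithm of similar cost.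


-- ===== PORT A =====
-- literal transliteration of A: build the {parent → child-index list} dict, flatten twice, zip
def edge_index_zipper (graph_dict : List (String × List (String × Int))) : List (Int × Int) :=
  let parent_child_idx_map : PySem.Dict Int (List Int) :=
    (PySem.List.pyRange 0 (graph_dict.length : Int) 1).foldl
      (fun d i => d.insert i []) PySem.Dict.empty
  let st :=
    graph_dict.foldl
      (fun (st : PySem.Dict Int (List Int) × Int × Int) kv =>
        let inner :=
          kv.2.foldl
            (fun (s : PySem.Dict Int (List Int) × Int) _ =>
              (s.1.modify st.2.1 [] (· ++ [s.2]), s.2 + 1))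
            (st.1, st.2.2)
        (inner.1, st.2.1 + 1, inner.2))
      (parent_child_idx_map, 0, 0)
  let lists :=
    st.1.items.foldl
      (fun (acc : List (List Int) × List (List Int)) kv =>
        (acc.1 ++ [List.replicate kv.2.length kv.1], acc.2 ++ [kv.2]))
      ([], [])
  (lists.1.flatMap id).zip (lists.2.flatMap id)

-- ===== PORT B =====
-- B's hand-written binary-search loop 'while lo < hi: …' (lo, hi are Python ints that stay ≥ 0,
-- ported as Nat; prefix[mid+1] is always in range in B's calls, so List.getD is exact there)
def pvParentOf (pfx : List Int) (j : Int) (lo hi : Nat) : Nat :=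
  if lo < hi then
    let mid := (lo + hi) / 2
    if pfx.getD (mid + 1) 0 ≤ j then pvParentOf pfx j (mid + 1) hi
    else pvParentOf pfx j lo mid
  else lo
termination_by hi - lo
decreasing_by all_goals omega

-- literal transliteration of B: prefix sums of the inner sizes, then one binary search per child index
def edge_index_zipper_alt (graph_dict : List (String × List (String × Int))) : List (Int × Int) :=
  let lengths : List Int := graph_dict.map (fun kv => (kv.2.length : Int))
  let pfx : List Int :=
    lengths.foldl (fun p n => p ++ [PySem.List.pyGetD p (-1) 0 + n]) [0]
  let total : Int := PySem.List.pyGetD pfx (-1) 0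
  ((PySem.List.pyRange 0 total 1).map
      (fun j => ((pvParentOf pfx j 0 lengths.length : Nat) : Int))).zip
    (PySem.List.pyRange 0 total 1)

-- ===== PRECONDITION & SPEC =====
def Spec_edge_index_zipper (graph_dict : List (String × List (String × Int))) (out : List (Int × Int)) : Prop := out = edge_index_zipper_alt graph_dict
instance (graph_dict : List (String × List (String × Int))) (out : List (Int × Int)) : Decidable (Spec_edge_index_zipper graph_dict out) := by unfold Spec_edge_index_zipper; infer_instance

-- ===== CLAIM (what is proved, stated in full; the proofs are below) =====
def Claim_equal_edge_index_zipper : Prop := ∀ (graph_dict : List (String × List (String × Int))), Dom_edge_index_zipper graph_dict → Spec_edge_index_zipper graph_dict (edge_index_zipper graph_dict)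

-- ===== LEMMAS AND PROOFS =====

-- ---------- A-side: named loops and a closed form ----------

-- A's inner loop (over one value dict) and outer loop, named for the proofs
def pvInner (p : Int) (v : List (String × Int)) (d : PySem.Dict Int (List Int)) (c : Int) :
    PySem.Dict Int (List Int) × Int :=
  v.foldl (fun s _ => (s.1.modify p [] (· ++ [s.2]), s.2 + 1)) (d, c)

def pvOuter (gd : List (String × List (String × Int)))
    (st : PySem.Dict Int (List Int) × Int × Int) : PySem.Dict Int (List Int) × Int × Int :=
  gd.foldl
    (fun st kv =>
      let inner := pvInner st.2.1 kv.2 st.1 st.2.2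
      (inner.1, st.2.1 + 1, inner.2)) st

-- the child-index block that ends up stored under key q, as a function of the value lengths
def pvChunk : List Nat → Int → Int → Int → List Int
  | [], _, _, _ => []
  | l :: L, p, c, q =>
      (if q = p then PySem.List.pyRange c (c + (l : Int)) 1 else []) ++ pvChunk L (p + 1) (c + (l : Int)) q

-- the flattened parent-index list: l₀ copies of p, l₁ copies of p+1, …
def pvBlocks : Int → List Nat → List Int
  | _, [] => []
  | p, l :: L => List.replicate l p ++ pvBlocks (p + 1) L

theorem pvInner_snd (p : Int) (v : List (String × Int)) :
    ∀ (d : PySem.Dict Int (List Int)) (c : Int), (pvInner p v d c).2 = c + v.length := by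
  induction v with
  | nil => intro d c; simp [pvInner]
  | cons x v ih =>
      intro d c
      have : pvInner p (x :: v) d c = pvInner p v (d.modify p [] (· ++ [c])) (c + 1) := rfl
      rw [this, ih]
      simp only [List.length_cons]; push_cast; omega

theorem pvInner_keys (p : Int) (v : List (String × Int)) :
    ∀ (d : PySem.Dict Int (List Int)) (c : Int), d.contains p = true →
      (pvInner p v d c).1.keys = d.keys := by
  induction v with
  | nil => intro d c _; simp [pvInner]
  | cons x v ih =>
      intro d c h
      have hstep : pvInner p (x :: v) d c = pvInner p v (d.modify p [] (· ++ [c])) (c + 1) := rfl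
      rw [hstep, ih _ _ (by simp [PySem.Dict.contains_modify])]
      rw [PySem.Dict.keys_modify, PySem.Dict.keys_insert_of_contains _ _ h]

theorem pvInner_getD (p : Int) (v : List (String × Int)) :
    ∀ (d : PySem.Dict Int (List Int)) (c q : Int),
      (pvInner p v d c).1.getD q [] =
        d.getD q [] ++ (if q = p then PySem.List.pyRange c (c + v.length) 1 else []) := by
  induction v with
  | nil =>
      intro d c q
      simp [pvInner, PySem.List.pyRange_one_eq_nil (le_refl c)]
  | cons x v ih =>
      intro d c q
      have hstep : pvInner p (x :: v) d c = pvInner p v (d.modify p [] (· ++ [c])) (c + 1) := rfl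
      rw [hstep, ih, PySem.Dict.getD_modify]
      by_cases hq : q = p
      · subst hq
        simp only [List.length_cons]
        push_cast
        rw [show c + 1 + (v.length : Int) = c + ((v.length : Int) + 1) from by ring,
          PySem.List.pyRange_one_cons (show c < c + ((v.length : Int) + 1) by omega)]
        simp [List.append_assoc]
      · simp [hq]

theorem pvOuter_getD (gd : List (String × List (String × Int))) :
    ∀ (d : PySem.Dict Int (List Int)) (p c q : Int),
      (pvOuter gd (d, p, c)).1.getD q [] =
        d.getD q [] ++ pvChunk (gd.map (·.2.length)) p c q := by
  induction gd with
  | nil => intro d p c q; simp [pvOuter, pvChunk]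
  | cons kv gd ih =>
      intro d p c q
      have hstep : pvOuter (kv :: gd) (d, p, c)
          = pvOuter gd ((pvInner p kv.2 d c).1, p + 1, (pvInner p kv.2 d c).2) := rfl
      rw [hstep, pvInner_snd, ih, pvInner_getD]
      simp [pvChunk, List.append_assoc]

theorem pvOuter_keys (gd : List (String × List (String × Int))) :
    ∀ (d : PySem.Dict Int (List Int)) (p c : Int),
      (∀ j : Nat, j < gd.length → d.contains (p + j) = true) →
      (pvOuter gd (d, p, c)).1.keys = d.keys := by
  induction gd with
  | nil => intro d p c _; simp [pvOuter]
  | cons kv gd ih =>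
      intro d p c h
      have hp : d.contains p = true := by simpa using h 0 (by simp)
      have hkeys := pvInner_keys p kv.2 d c hp
      have hstep : pvOuter (kv :: gd) (d, p, c)
          = pvOuter gd ((pvInner p kv.2 d c).1, p + 1, (pvInner p kv.2 d c).2) := rfl
      rw [hstep, ih _ _ _ ?_, hkeys]
      intro j hj
      have hcontains : d.contains (p + 1 + j) = true := by
        have := h (j + 1) (by simpa using Nat.succ_lt_succ hj)
        have harg : p + ((j : Int) + 1) = p + 1 + (j : Int) := by ring
        simpa [harg] using this
      rw [PySem.Dict.contains_iff_mem_keys, hkeys, ← PySem.Dict.contains_iff_mem_keys]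
      exact hcontains

theorem pvInit_getD (l : List Int) :
    ∀ (d : PySem.Dict Int (List Int)), (∀ q, d.getD q [] = []) →
      ∀ q, (l.foldl (fun d i => d.insert i ([] : List Int)) d).getD q [] = [] := by
  induction l with
  | nil => intro d h q; simpa using h q
  | cons i l ih =>
      intro d h q
      refine ih _ ?_ q
      intro q'
      rw [PySem.Dict.getD_insert]
      split_ifs with h' <;> simp [h]

theorem pvChunk_eq_nil_of_lt : ∀ (L : List Nat) (p c q : Int), q < p → pvChunk L p c q = [] := by
  intro L
  induction L with
  | nil => intro p c q _; rfl
  | cons l L ih =>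
      intro p c q h
      simp only [pvChunk]
      rw [if_neg (by omega : ¬ q = p), ih (p + 1) _ q (by omega)]
      rfl

theorem pvFlatMap_chunk : ∀ (L : List Nat) (p c : Int),
    (PySem.List.pyRange p (p + L.length) 1).flatMap (fun q => pvChunk L p c q)
      = PySem.List.pyRange c (c + L.sum) 1 := by
  intro L
  induction L with
  | nil =>
      intro p c
      simp [PySem.List.pyRange_one_eq_nil (le_refl p), PySem.List.pyRange_one_eq_nil (le_refl c)]
  | cons l L ih =>
      intro p c
      rw [PySem.List.pyRange_one_cons (show p < p + ((l :: L).length : Int) by simp only [List.length_cons]; push_cast; omega)]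
      rw [List.flatMap_cons]
      have htail : (PySem.List.pyRange (p + 1) (p + ((l :: L).length : Int)) 1).flatMap
            (fun q => pvChunk (l :: L) p c q)
          = (PySem.List.pyRange (p + 1) (p + 1 + (L.length : Int)) 1).flatMap
            (fun q => pvChunk L (p + 1) (c + l) q) := by
        have hb : p + ((l :: L).length : Int) = p + 1 + (L.length : Int) := by
          simp only [List.length_cons]; push_cast; ring
        rw [hb]
        refine List.flatMap_congr ?_
        intro q hq
        have hq1 : p + 1 ≤ q := (PySem.List.mem_pyRange_one.1 hq).1
        simp only [pvChunk]
        rw [if_neg (by omega : ¬ q = p)]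
        exact List.nil_append _
      rw [htail, ih]
      have hhead : pvChunk (l :: L) p c p = PySem.List.pyRange c (c + (l : Int)) 1 := by
        simp [pvChunk, pvChunk_eq_nil_of_lt L (p + 1) _ p (by omega)]
      rw [hhead,
        ← PySem.List.pyRange_one_append c (c + (l : Int)) (c + (l : Int) + (L.sum : Int))
            (by omega) (by omega)]
      congr 1
      simp only [List.sum_cons]; push_cast; ring

theorem pvFlatMap_parent : ∀ (L : List Nat) (p c : Int),
    (PySem.List.pyRange p (p + L.length) 1).flatMap
        (fun q => List.replicate (pvChunk L p c q).length q)
      = pvBlocks p L := by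
  intro L
  induction L with
  | nil => intro p c; simp [PySem.List.pyRange_one_eq_nil (le_refl p), pvBlocks]
  | cons l L ih =>
      intro p c
      rw [PySem.List.pyRange_one_cons (show p < p + ((l :: L).length : Int) by simp only [List.length_cons]; push_cast; omega)]
      rw [List.flatMap_cons]
      have hhead : pvChunk (l :: L) p c p = PySem.List.pyRange c (c + (l : Int)) 1 := by
        simp [pvChunk, pvChunk_eq_nil_of_lt L (p + 1) _ p (by omega)]
      have htail : (PySem.List.pyRange (p + 1) (p + ((l :: L).length : Int)) 1).flatMap
            (fun q => List.replicate (pvChunk (l :: L) p c q).length q)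
          = (PySem.List.pyRange (p + 1) (p + 1 + (L.length : Int)) 1).flatMap
            (fun q => List.replicate (pvChunk L (p + 1) (c + l) q).length q) := by
        have hb : p + ((l :: L).length : Int) = p + 1 + (L.length : Int) := by
          simp only [List.length_cons]; push_cast; ring
        rw [hb]
        refine List.flatMap_congr ?_
        intro q hq
        have hq1 : p + 1 ≤ q := (PySem.List.mem_pyRange_one.1 hq).1
        simp only [pvChunk]
        rw [if_neg (by omega : ¬ q = p)]
        exact List.nil_append _
      rw [htail, ih, hhead]
      simp [pvBlocks, PySem.List.length_pyRange_one]

theorem pvBlocks_length : ∀ (L : List Nat) (p : Int), (pvBlocks p L).length = L.sum := by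
  intro L
  induction L with
  | nil => intro p; rfl
  | cons l L ih => intro p; simp [pvBlocks, ih]

-- A, rewritten through the named loops (definitional)
theorem pvA_unfold (gd : List (String × List (String × Int))) :
    edge_index_zipper gd =
      (((pvOuter gd
            ((PySem.List.pyRange 0 (gd.length : Int) 1).foldl
              (fun d i => d.insert i []) PySem.Dict.empty, 0, 0)).1.items.foldl
          (fun (acc : List (List Int) × List (List Int)) kv =>
            (acc.1 ++ [List.replicate kv.2.length kv.1], acc.2 ++ [kv.2]))
          ([], [])).1.flatMap id).zip
      (((pvOuter gd
            ((PySem.List.pyRange 0 (gd.length : Int) 1).foldl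
              (fun d i => d.insert i []) PySem.Dict.empty, 0, 0)).1.items.foldl
          (fun (acc : List (List Int) × List (List Int)) kv =>
            (acc.1 ++ [List.replicate kv.2.length kv.1], acc.2 ++ [kv.2]))
          ([], [])).2.flatMap id) := rfl

theorem pvA_items (gd : List (String × List (String × Int))) :
    (pvOuter gd
        ((PySem.List.pyRange 0 (gd.length : Int) 1).foldl
          (fun d i => d.insert i []) PySem.Dict.empty, 0, 0)).1.items
      = (PySem.List.pyRange 0 (gd.length : Int) 1).map
          (fun i => (i, pvChunk (gd.map (·.2.length)) 0 0 i)) := by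
  set m0 := (PySem.List.pyRange 0 (gd.length : Int) 1).foldl
      (fun d i => d.insert i ([] : List Int)) PySem.Dict.empty with hm0
  have hitems : m0.items = (PySem.List.pyRange 0 (gd.length : Int) 1).map (fun i => (i, ([] : List Int))) := by
    rw [hm0]
    have := PySem.Dict.items_foldl_insert_fresh (PySem.List.pyRange 0 (gd.length : Int) 1)
      (fun i => i) (fun _ => ([] : List Int)) PySem.Dict.empty
      (by intro a _; simp) (by simpa using PySem.List.nodup_pyRange_one 0 (gd.length : Int))
    simpa using this
  have hkeys0 : m0.keys = PySem.List.pyRange 0 (gd.length : Int) 1 := by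
    simp [PySem.Dict.keys, hitems, Function.comp_def]
  have hcont : ∀ j : Nat, j < gd.length → m0.contains ((0 : Int) + j) = true := by
    intro j hj
    rw [PySem.Dict.contains_iff_mem_keys, hkeys0]
    exact PySem.List.mem_pyRange_one.2 ⟨by omega, by omega⟩
  have hkeys : (pvOuter gd (m0, 0, 0)).1.keys = PySem.List.pyRange 0 (gd.length : Int) 1 := by
    rw [pvOuter_keys gd m0 0 0 hcont, hkeys0]
  have hnodup : (pvOuter gd (m0, 0, 0)).1.keys.Nodup := by
    rw [hkeys]; exact PySem.List.nodup_pyRange_one 0 (gd.length : Int)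
  have hgd0 : ∀ q, m0.getD q [] = [] := by
    intro q
    rw [hm0]
    exact pvInit_getD _ PySem.Dict.empty (by intro q'; simp) q
  have hgd : ∀ q, (pvOuter gd (m0, 0, 0)).1.getD q [] = pvChunk (gd.map (·.2.length)) 0 0 q := by
    intro q
    rw [pvOuter_getD gd m0 0 0 q, hgd0]
    simp
  rw [PySem.Dict.items_eq_map_keys _ hnodup [], hkeys]
  exact List.map_congr_left (by intro i _; rw [hgd])

theorem pvA_closed (gd : List (String × List (String × Int))) :
    edge_index_zipper gd
      = (pvBlocks 0 (gd.map (·.2.length))).zip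
          (PySem.List.pyRange 0 ((gd.map (·.2.length)).sum : Int) 1) := by
  rw [pvA_unfold gd]
  rw [PySem.List.foldl_prod_mk
      (fun (s : List (List Int)) (kv : Int × List Int) => s ++ [List.replicate kv.2.length kv.1])
      (fun (s : List (List Int)) (kv : Int × List Int) => s ++ [kv.2])]
  rw [pvA_items gd]
  rw [PySem.List.foldl_append_singleton_eq_map, PySem.List.foldl_append_singleton_eq_map]
  simp only [List.nil_append, List.map_map, List.flatMap_map, Function.comp_def, id_eq]
  have hlen : (gd.length : Int) = (0 : Int) + ((gd.map (·.2.length)).length : Int) := by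
    simp
  rw [hlen]
  rw [pvFlatMap_parent (gd.map (·.2.length)) 0 0, pvFlatMap_chunk (gd.map (·.2.length)) 0 0]
  push_cast
  simp [Function.comp_def]

-- ---------- B-side: the prefix table is a scanl, the binary search finds the block ----------

-- B's prefix-building loop is scanl of (+)
theorem pvBuild_prefix : ∀ (L : List Int) (p : List Int) (a : Int),
    L.foldl (fun p n => p ++ [PySem.List.pyGetD p (-1) 0 + n]) (p ++ [a])
      = p ++ L.scanl (· + ·) a := by
  intro L
  induction L with
  | nil => intro p a; simp [List.scanl_nil]
  | cons n L ih =>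
      intro p a
      rw [List.foldl_cons, PySem.List.pyGetD_neg_one_append_singleton]
      rw [ih (p ++ [a]) (a + n)]
      simp [List.scanl_cons]

theorem pvScanl_getD : ∀ (L : List Int) (a : Int) (i : Nat), i ≤ L.length →
    (L.scanl (· + ·) a).getD i 0 = a + (L.take i).sum := by
  intro L
  induction L with
  | nil =>
      intro a i hi
      have : i = 0 := by simpa using hi
      subst this
      simp [List.scanl_nil]
  | cons n L ih =>
      intro a i hi
      rw [List.scanl_cons]
      cases i with
      | zero => simp
      | succ i =>
          simp only [List.getD_cons_succ, List.take_succ_cons, List.sum_cons]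
          rw [ih (a + n) i (by simpa using hi)]
          ring

theorem pvScanl_ne_nil (L : List Int) (a : Int) : L.scanl (· + ·) a ≠ [] := by
  cases L <;> simp [List.scanl_nil, List.scanl_cons]

-- binary-search loop invariant: the result's prefix-sum bracket contains j
theorem pvBS_spec : ∀ (k : Nat) (pfx : List Int) (j : Int) (lo hi : Nat),
    hi - lo ≤ k → lo ≤ hi →
    pfx.getD lo 0 ≤ j → (j < pfx.getD (hi + 1) 0 ∨ j < pfx.getD hi 0) →
    lo ≤ pvParentOf pfx j lo hi ∧ pvParentOf pfx j lo hi ≤ hi ∧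
      pfx.getD (pvParentOf pfx j lo hi) 0 ≤ j ∧
      j < pfx.getD (pvParentOf pfx j lo hi + 1) 0 := by
  intro k
  induction k with
  | zero =>
      intro pfx j lo hi hk hle hlo hhi
      have heq : lo = hi := by omega
      subst heq
      rw [pvParentOf]
      simp only [lt_irrefl, if_false]
      refine ⟨le_refl _, le_refl _, hlo, ?_⟩
      rcases hhi with h | h
      · exact h
      · omega
  | succ k ih =>
      intro pfx j lo hi hk hle hlo hhi
      by_cases hlt : lo < hi
      · rw [pvParentOf]
        simp only [hlt, if_true]
        set mid := (lo + hi) / 2 with hmid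
        have hmid1 : lo ≤ mid := by omega
        have hmid2 : mid < hi := by omega
        by_cases hc : pfx.getD (mid + 1) 0 ≤ j
        · simp only [hc, if_true]
          have := ih pfx j (mid + 1) hi (by omega) (by omega) hc hhi
          exact ⟨by omega, this.2.1, this.2.2.1, this.2.2.2⟩
        · simp only [hc, if_false]
          have := ih pfx j lo mid (by omega) (by omega) hlo (Or.inl (by omega))
          exact ⟨this.1, by omega, this.2.2.1, this.2.2.2⟩
      · have heq : lo = hi := by omega
        subst heq
        rw [pvParentOf]
        simp only [lt_irrefl, if_false]
        refine ⟨le_refl _, le_refl _, hlo, ?_⟩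
        rcases hhi with h | h
        · exact h
        · omega

-- the parent index of flat child j as a linear recursion, and its bracket characterisation
def pvIdx : List Nat → Int → Int
  | [], _ => 0
  | l :: L, j => if j < (l : Int) then 0 else 1 + pvIdx L (j - l)

theorem pvBlocks_getD : ∀ (L : List Nat) (p : Int) (j : Nat), j < L.sum →
    (pvBlocks p L).getD j 0 = p + pvIdx L (j : Int) := by
  intro L
  induction L with
  | nil => intro p j hj; simp at hj
  | cons l L ih =>
      intro p j hj
      simp only [pvBlocks, pvIdx]
      by_cases hjl : j < l
      · rw [List.getD_append _ _ _ _ (by simpa using hjl)]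
        rw [if_pos (by exact_mod_cast hjl)]
        simp [hjl]
      · have hlen : (List.replicate l p).length = l := List.length_replicate
        rw [List.getD_append_right _ _ _ _ (by omega)]
        rw [hlen, ih (p + 1) (j - l) (by simp at hj; omega)]
        rw [if_neg (by omega : ¬ ((j : Int) < (l : Int)))]
        have : ((j - l : Nat) : Int) = (j : Int) - (l : Int) := by omega
        rw [this]; ring

theorem pvIdx_bracket : ∀ (L : List Nat) (j : Int), 0 ≤ j → j < (L.sum : Int) →
    ∃ i : Nat, pvIdx L j = (i : Int) ∧ i < L.length ∧
      ((L.take i).sum : Int) ≤ j ∧ j < ((L.take (i + 1)).sum : Int) := by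
  intro L
  induction L with
  | nil => intro j h0 hs; simp at hs; omega
  | cons l L ih =>
      intro j h0 hs
      simp only [pvIdx]
      by_cases hjl : j < (l : Int)
      · refine ⟨0, by simp [hjl], by simp, by simpa using h0, ?_⟩
        simpa using hjl
      · obtain ⟨i, hi1, hi2, hi3, hi4⟩ := ih (j - l) (by omega)
          (by simp only [List.sum_cons] at hs; omega)
        refine ⟨i + 1, ?_, by simpa using Nat.succ_lt_succ hi2, ?_, ?_⟩
        · rw [if_neg hjl, hi1]; push_cast; ring
        · simp only [List.take_succ_cons, List.sum_cons]; omega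
        · simp only [List.take_succ_cons, List.sum_cons]; omega

-- prefix sums of a Nat list are monotone in the cut point
theorem pvTakeSum_mono (L : List Nat) (a b : Nat) (h : a ≤ b) :
    (L.take a).sum ≤ (L.take b).sum := by
  have hsub : (L.take a).Sublist (L.take b) := List.take_sublist_take_left h
  exact hsub.sum_le_sum (by intro x _; exact Nat.zero_le x)

-- the binary search computes pvIdx: both land in the same (unique) prefix-sum bracket
theorem pvBS_eq_idx (N : List Nat) (j : Int) (h0 : 0 ≤ j) (hs : j < (N.sum : Int)) :
    ((pvParentOf ((N.map (Nat.cast : Nat → Int)).scanl (· + ·) 0) j 0 N.length : Nat) : Int)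
      = pvIdx N j := by
  set L : List Int := N.map (Nat.cast : Nat → Int) with hL
  set pfx := L.scanl (· + ·) 0 with hpfx
  have hlen : L.length = N.length := by simp [hL]
  have hgetD : ∀ i : Nat, i ≤ N.length → pfx.getD i 0 = ((N.take i).sum : Int) := by
    intro i hi
    rw [hpfx, pvScanl_getD L 0 i (by omega)]
    rw [hL, ← List.map_take, Nat.cast_list_sum]
    ring
  have hget0 : pfx.getD 0 0 ≤ j := by rw [hgetD 0 (Nat.zero_le _)]; simpa using h0
  have hgetn : j < pfx.getD N.length 0 := by
    rw [hgetD N.length (le_refl _)]; simpa using hs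
  obtain ⟨hr1, hr2, hr3, hr4⟩ :=
    pvBS_spec N.length pfx j 0 N.length (by omega) (Nat.zero_le _) hget0 (Or.inr hgetn)
  set r := pvParentOf pfx j 0 N.length with hr
  -- r < N.length: otherwise getD (r+1) is out of range and j < 0
  have hrlt : r < N.length := by
    by_contra hcon
    have hreq : r = N.length := by omega
    have : pfx.getD (r + 1) 0 = 0 := by
      apply List.getD_eq_default
      have : pfx.length = N.length + 1 := by simp [hpfx, List.length_scanl, hlen]
      omega
    omega
  have hrlow : ((N.take r).sum : Int) ≤ j := by rw [← hgetD r (by omega)]; exact hr3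
  have hrhigh : j < ((N.take (r + 1)).sum : Int) := by rw [← hgetD (r + 1) (by omega)]; exact hr4
  obtain ⟨i, hi1, hi2, hi3, hi4⟩ := pvIdx_bracket N j h0 hs
  -- uniqueness of the bracket
  have : r = i := by
    by_contra hne
    rcases Nat.lt_or_ge r i with hlt | hge
    · have := pvTakeSum_mono N (r + 1) i hlt
      omega
    · have hilt : i < r := by omega
      have := pvTakeSum_mono N (i + 1) r hilt
      omega
  rw [hi1, this]

-- B, in the same closed form as A
theorem pvB_closed (gd : List (String × List (String × Int))) :
    edge_index_zipper_alt gd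
      = (pvBlocks 0 (gd.map (·.2.length))).zip
          (PySem.List.pyRange 0 ((gd.map (·.2.length)).sum : Int) 1) := by
  set N : List Nat := gd.map (·.2.length) with hN
  have hLmap : gd.map (fun kv => (kv.2.length : Int)) = N.map (Nat.cast : Nat → Int) := by
    simp [hN, List.map_map, Function.comp_def]
  simp only [edge_index_zipper_alt]
  rw [hLmap]
  have hpfx : (N.map (Nat.cast : Nat → Int)).foldl
      (fun p n => p ++ [PySem.List.pyGetD p (-1) 0 + n]) [0]
      = (N.map (Nat.cast : Nat → Int)).scanl (· + ·) 0 := by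
    simpa using pvBuild_prefix (N.map (Nat.cast : Nat → Int)) [] 0
  rw [hpfx]
  have hne := pvScanl_ne_nil (N.map (Nat.cast : Nat → Int)) 0
  have hlenscan : ((N.map (Nat.cast : Nat → Int)).scanl (· + ·) 0).length = N.length + 1 := by
    simp [List.length_scanl]
  have htotal : PySem.List.pyGetD ((N.map (Nat.cast : Nat → Int)).scanl (· + ·) 0) (-1) 0
      = (N.sum : Int) := by
    rw [PySem.List.pyGetD_neg_one _ _ hne, List.getLast_eq_getElem,
      ← List.getD_eq_getElem _ 0 (by omega), hlenscan]
    simp only [Nat.add_sub_cancel]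
    rw [pvScanl_getD _ 0 N.length (by simp), ← List.map_take, Nat.cast_list_sum]
    simp
  rw [htotal]
  have hmaplen : (N.map (Nat.cast : Nat → Int)).length = N.length := by simp
  rw [hmaplen, Nat.cast_list_sum]
  -- both sides are zips with the same second component; compare the first components
  congr 1
  apply List.ext_getElem
  · have hsum : (List.map (Nat.cast : Nat → Int) N).sum = (N.sum : Int) :=
      (Nat.cast_list_sum N).symm
    rw [List.length_map, PySem.List.length_pyRange_one, pvBlocks_length]
    omega
  · intro k h1 h2
    rw [List.getElem_map, PySem.List.getElem_pyRange_one]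
    have hk : k < N.sum := by
      have hsum : (List.map (Nat.cast : Nat → Int) N).sum = (N.sum : Int) :=
        (Nat.cast_list_sum N).symm
      rw [List.length_map, PySem.List.length_pyRange_one] at h1
      omega
    have hj0 : (0 : Int) ≤ 0 + (k : Int) := by omega
    have hjs : 0 + (k : Int) < (N.sum : Int) := by omega
    rw [pvBS_eq_idx N (0 + (k : Int)) hj0 hjs]
    rw [← List.getD_eq_getElem _ 0 h2]
    rw [pvBlocks_getD N 0 k hk]
    simp

-- ===== VERDICT (by name: the statement is the Claim_ definition above) =====
theorem edge_index_zipper_spec : Claim_equal_edge_index_zipper := by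
  intro gd _
  unfold Spec_edge_index_zipper
  rw [pvA_closed gd, pvB_closed gd]
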